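-- pv_equiv track=rewrite | github.com/jdangerx/cyclus | cli/cycpp.py | outter_split
-- ===== SOURCE A (Python) =====
-- def outter_split(s, open_brace='(', close_brace=')', separator=','):
--     """Takes a string and only split the outter most level."""
--     outter = []
--     ns = s.split(separator)
--     count = 0
--     val = ''
--     for n in ns:
--         count += n.count(open_brace)
--         count -= n.count(close_brace)
--         val += n
--         if count == 0:
--             outter.append(val.strip())
--             val = ''
--         else:
--             val += separator
--     return outter
-- ===== SOURCE B (Python) =====
-- def outter_split(s, open_brace='(', close_brace=')', separator=','):
--     """Takes a string and only split the outter most level."""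
--     ns = s.split(separator)
--     pieces = []
--     lo = 0
--     while lo < len(ns):
--         depth = 0
--         hi = None
--         for j in range(lo, len(ns)):
--             depth += ns[j].count(open_brace) - ns[j].count(close_brace)
--             if depth == 0:
--                 hi = j
--                 break
--         if hi is None:
--             break
--         pieces.append(separator.join(ns[lo:hi + 1]).strip())
--         lo = hi + 1
--     return pieces
-- ===== Notes on version B (the rewrite author's own statement) =====
-- stated objective: alternative
-- what changed: Replaces the single streaming accumulator (running count + growing val string) with repeatedly searching the shortest balanced run of split chunks and emitting separator.join of that slice, stripped.
import Mathlib
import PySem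

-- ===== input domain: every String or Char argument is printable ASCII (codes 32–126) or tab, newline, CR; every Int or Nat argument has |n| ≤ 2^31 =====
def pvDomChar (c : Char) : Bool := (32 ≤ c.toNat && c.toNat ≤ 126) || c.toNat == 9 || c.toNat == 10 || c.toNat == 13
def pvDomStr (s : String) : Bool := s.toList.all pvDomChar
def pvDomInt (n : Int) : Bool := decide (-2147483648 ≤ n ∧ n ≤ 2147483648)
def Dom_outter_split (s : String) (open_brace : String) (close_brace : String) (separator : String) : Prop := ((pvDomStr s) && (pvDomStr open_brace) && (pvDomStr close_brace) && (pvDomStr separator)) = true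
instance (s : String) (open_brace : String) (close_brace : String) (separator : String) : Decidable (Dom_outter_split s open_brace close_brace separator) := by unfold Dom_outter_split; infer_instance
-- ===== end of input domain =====

-- B replaces A's streaming accumulator (running brace count + growing val string) by
-- repeatedly searching the shortest balanced run of separator-chunks and joining that slice
-- (objective: alternative decomposition, same cost).


-- ===== PORT A =====
-- the body of A's 'for n in ns' loop, state = (outter, count, val)
def osStepA (o c sep : List Char) (st : List (List Char) × Int × List Char) (n : List Char) :
    List (List Char) × Int × List Char :=
  let count := st.2.1 + (PySem.Chars.count n o : Int) - (PySem.Chars.count n c : Int)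
  let val := st.2.2 ++ n
  if count = 0 then (st.1 ++ [PySem.Chars.strip val], count, [])
  else (st.1, count, val ++ sep)

def outter_split (s : String) (open_brace : String) (close_brace : String) (separator : String) : List String :=
  match PySem.Chars.split? s.toList separator.toList with
  | none => []      -- an empty separator makes str.split raise ValueError: excluded by Pre_outter_split
  | some ns =>
    ((ns.foldl (osStepA open_brace.toList close_brace.toList separator.toList) ([], 0, [])).1).map String.ofList

-- ===== PORT B =====
-- Source B's inner 'for j in range(lo, len(ns))' search: index of the first chunk at which the
-- running brace depth returns to 0, relative to the start of the remaining chunk list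
def osFindBal (o c : List Char) (depth : Int) : List (List Char) → Option Nat
  | [] => none
  | n :: ns =>
    let depth := depth + (PySem.Chars.count n o : Int) - (PySem.Chars.count n c : Int)
    if depth = 0 then some 0 else (osFindBal o c depth ns).map (· + 1)

-- Source B's outer 'while lo < len(ns)' loop (the remaining chunks ns[lo:] are the argument)
def osPieces (o c sep : List Char) : List (List Char) → List (List Char)
  | [] => []
  | n :: ns =>
    match osFindBal o c 0 (n :: ns) with
    | none => []
    | some j =>
      PySem.Chars.strip (PySem.Chars.join sep ((n :: ns).take (j + 1)))
        :: osPieces o c sep ((n :: ns).drop (j + 1))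
termination_by l => l.length
decreasing_by simp

def outter_split_alt (s : String) (open_brace : String) (close_brace : String) (separator : String) : List String :=
  match PySem.Chars.split? s.toList separator.toList with
  | none => []      -- an empty separator makes str.split raise ValueError: excluded by Pre_outter_split
  | some ns =>
    (osPieces open_brace.toList close_brace.toList separator.toList ns).map String.ofList

-- ===== PRECONDITION & SPEC =====
-- Pre_ excludes only the inputs on which A raises: an empty separator makes str.split raise ValueError.
def Pre_outter_split (s : String) (open_brace : String) (close_brace : String) (separator : String) : Prop :=
  separator ≠ ""
instance (s : String) (open_brace : String) (close_brace : String) (separator : String) : Decidable (Pre_outter_split s open_brace close_brace separator) := by unfold Pre_outter_split; infer_instance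

def pvWitness_outter_split : String × String × String × String := ("f(a, b), g(c) , d", "(", ")", ",")

def Spec_outter_split (s : String) (open_brace : String) (close_brace : String) (separator : String) (out : List String) : Prop := out = outter_split_alt s open_brace close_brace separator
instance (s : String) (open_brace : String) (close_brace : String) (separator : String) (out : List String) : Decidable (Spec_outter_split s open_brace close_brace separator out) := by unfold Spec_outter_split; infer_instance

-- ===== CLAIM (what is proved, stated in full; the proofs are below) =====
def Claim_equal_outter_split : Prop := ∀ (s : String) (open_brace : String) (close_brace : String) (separator : String), Dom_outter_split s open_brace close_brace separator → Pre_outter_split s open_brace close_brace separator → Spec_outter_split s open_brace close_brace separator (outter_split s open_brace close_brace separator)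

-- ===== LEMMAS AND PROOFS =====

-- common reference function: group the chunks with running count cnt and pending value v
def osGrp (o c sep : List Char) : List (List Char) → Int → List Char → List (List Char)
  | [], _, _ => []
  | n :: ns, cnt, v =>
    let cnt' := cnt + (PySem.Chars.count n o : Int) - (PySem.Chars.count n c : Int)
    if cnt' = 0 then PySem.Chars.strip (v ++ n) :: osGrp o c sep ns 0 []
    else osGrp o c sep ns cnt' (v ++ n ++ sep)

theorem foldl_osStepA_eq_osGrp (o c sep : List Char) (ns : List (List Char)) :
    ∀ (acc : List (List Char)) (cnt : Int) (v : List Char),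
      (ns.foldl (osStepA o c sep) (acc, cnt, v)).1 = acc ++ osGrp o c sep ns cnt v := by
  induction ns with
  | nil => intro acc cnt v; simp [osGrp]
  | cons n ns ih =>
    intro acc cnt v
    simp only [List.foldl_cons, osStepA, osGrp]
    split_ifs with h
    · rw [h, ih]; simp
    · rw [ih]

theorem osGrp_eq_find (o c sep : List Char) (ns : List (List Char)) :
    ∀ (cnt : Int) (v : List Char),
      osGrp o c sep ns cnt v =
        match osFindBal o c cnt ns with
        | none => []
        | some j =>
          PySem.Chars.strip (v ++ PySem.Chars.join sep (ns.take (j + 1)))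
            :: osGrp o c sep (ns.drop (j + 1)) 0 [] := by
  induction ns with
  | nil => intro cnt v; simp [osGrp, osFindBal]
  | cons n ns ih =>
    intro cnt v
    simp only [osGrp, osFindBal]
    split_ifs with h
    · simp [PySem.Chars.join_singleton]
    · rw [ih]
      cases hf : osFindBal o c (cnt + (PySem.Chars.count n o : Int) - (PySem.Chars.count n c : Int)) ns with
      | none => simp
      | some j =>
        obtain ⟨m, rest, rfl⟩ : ∃ m rest, ns = m :: rest := by
          cases ns with
          | nil => exact absurd hf (by simp [osFindBal])
          | cons m rest => exact ⟨m, rest, rfl⟩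
        simp only [Option.map_some]
        have hj : (m :: rest).take (j + 1) = m :: rest.take j := by simp
        simp [hj, PySem.Chars.join_cons_cons, List.append_assoc]

theorem osPieces_eq_osGrp (o c sep : List Char) :
    ∀ (k : Nat) (ns : List (List Char)), ns.length ≤ k →
      osPieces o c sep ns = osGrp o c sep ns 0 [] := by
  intro k
  induction k with
  | zero =>
    intro ns h
    have : ns = [] := List.length_eq_zero_iff.mp (Nat.le_zero.mp h)
    subst this; rw [osPieces.eq_def]; simp [osGrp]
  | succ k ih =>
    intro ns h
    cases ns with
    | nil => rw [osPieces.eq_def]; simp [osGrp]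
    | cons n ns' =>
      rw [osPieces.eq_def, osGrp_eq_find]
      dsimp only
      cases hf : osFindBal o c 0 (n :: ns') with
      | none => rfl
      | some j =>
        dsimp only
        rw [List.nil_append, ih]
        simp at h ⊢
        omega

theorem outter_split_spec' (s : String) (open_brace : String) (close_brace : String) (separator : String) :
    outter_split s open_brace close_brace separator = outter_split_alt s open_brace close_brace separator := by
  unfold outter_split outter_split_alt
  cases PySem.Chars.split? s.toList separator.toList with
  | none => rfl
  | some ns =>
    simp only []
    rw [foldl_osStepA_eq_osGrp, osPieces_eq_osGrp _ _ _ ns.length ns le_rfl, List.nil_append]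

-- ===== VERDICT (by name: the statement is the Claim_ definition above) =====
theorem outter_split_spec : Claim_equal_outter_split := by
  intro s o c sep _ _
  exact outter_split_spec' s o c sep
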